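-- pv_equiv track=rewrite | github.com/deploifai/homebrew-deploifai | release/generate.py | parse_resource_stanzas_from_formula
-- ===== SOURCE A (Python) =====
-- def parse_resource_stanzas_from_formula(formula):
--     """Parse the resource stanzas from the formula."""
--     stanzas = []
--     not_end = False
--
--     for line in formula:
--         s = line.lstrip()
--         if s.startswith("resource"):
--             stanzas.append(line)
--             not_end = True
--         elif not_end:
--             stanzas[-1] += line
--             if s.startswith("end"):
--                 stanzas[-1] += "\n"
--                 not_end = False
--
--     return stanzas
-- ===== SOURCE B (Python) =====
-- def parse_resource_stanzas_from_formula(formula):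
--     """Parse the resource stanzas from the formula."""
--     lines = list(formula)
--     n = len(lines)
--     stanzas = []
--     i = 0
--     while i < n:
--         if lines[i].lstrip().startswith("resource"):
--             stanza = lines[i]
--             i += 1
--             while i < n:
--                 s = lines[i].lstrip()
--                 if s.startswith("resource"):
--                     break
--                 stanza += lines[i]
--                 i += 1
--                 if s.startswith("end"):
--                     stanza += "\n"
--                     break
--             stanzas.append(stanza)
--         else:
--             i += 1
--     return stanzas
-- ===== Notes on version B (the rewrite author's own statement) =====
-- stated objective: alternative
-- what changed: Replaces A's flag-based flat pass (appending into stanzas[-1]) with an index-driven nested loop that consumes a whole stanza at a time, building each stanza string locally and only then appending it.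
import Mathlib
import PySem

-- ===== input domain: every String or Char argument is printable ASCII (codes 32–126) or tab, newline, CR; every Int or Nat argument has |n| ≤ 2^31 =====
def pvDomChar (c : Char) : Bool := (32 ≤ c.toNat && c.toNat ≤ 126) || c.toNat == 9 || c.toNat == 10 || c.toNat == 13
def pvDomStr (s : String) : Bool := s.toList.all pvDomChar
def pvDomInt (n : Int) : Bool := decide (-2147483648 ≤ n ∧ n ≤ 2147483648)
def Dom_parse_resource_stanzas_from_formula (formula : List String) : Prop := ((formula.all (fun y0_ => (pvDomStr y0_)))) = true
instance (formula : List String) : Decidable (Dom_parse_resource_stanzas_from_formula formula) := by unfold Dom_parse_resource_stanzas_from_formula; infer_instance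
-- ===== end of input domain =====

-- B replaces A's flag-based flat pass with a nested consume-one-stanza-at-a-time loop; same cost, different decomposition.

-- ===== PORT A =====
-- 'stanzas[-1] += line' : replace the last element; the [] case is unreachable (guarded by the not_end flag).
def pvAppendLast : List String → String → List String
  | [], _ => []
  | [x], l => [x ++ l]
  | x :: y :: xs, l => x :: pvAppendLast (y :: xs) l

def pvStepA (st : List String × Bool) (line : String) : List String × Bool :=
  let s := PySem.Str.lstrip line
  if PySem.Str.startswith s "resource" then (st.1 ++ [line], true)
  else if st.2 then
    let st1 := pvAppendLast st.1 line
    if PySem.Str.startswith s "end" then (pvAppendLast st1 "\n", false)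
    else (st1, true)
  else st

def parse_resource_stanzas_from_formula (formula : List String) : List String :=
  (formula.foldl pvStepA ([], false)).1

-- ===== PORT B =====
-- inner while loop: consume lines into the current stanza until a 'resource' line (left unconsumed) or an 'end' line
def pvInner : String → List String → String × List String
  | acc, [] => (acc, [])
  | acc, l :: rest =>
    let s := PySem.Str.lstrip l
    if PySem.Str.startswith s "resource" then (acc, l :: rest)
    else if PySem.Str.startswith s "end" then (acc ++ l ++ "\n", rest)
    else pvInner (acc ++ l) rest

-- termination fact for the outer loop: the inner loop only consumes lines
theorem pvInner_snd_le : ∀ (rest : List String) (acc : String), (pvInner acc rest).2.length ≤ rest.length := by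
  intro rest
  induction rest with
  | nil => intro acc; simp [pvInner]
  | cons l t ih =>
    intro acc
    simp only [pvInner]
    split_ifs with h1 h2
    · simp
    · simp
    · exact le_trans (ih (acc ++ l)) (by simp)

def parse_resource_stanzas_from_formula_alt : List String → List String
  | [] => []
  | l :: rest =>
    if PySem.Str.startswith (PySem.Str.lstrip l) "resource" then
      let p := pvInner l rest
      p.1 :: parse_resource_stanzas_from_formula_alt p.2
    else parse_resource_stanzas_from_formula_alt rest
termination_by formula => formula.length
decreasing_by
  · have := pvInner_snd_le rest l; simp; omega
  · simp

-- ===== PRECONDITION & SPEC =====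
def Spec_parse_resource_stanzas_from_formula (formula : List String) (out : List String) : Prop := out = parse_resource_stanzas_from_formula_alt formula
instance (formula : List String) (out : List String) : Decidable (Spec_parse_resource_stanzas_from_formula formula out) := by unfold Spec_parse_resource_stanzas_from_formula; infer_instance

-- ===== CLAIM (what is proved, stated in full; the proofs are below) =====
def Claim_equal_parse_resource_stanzas_from_formula : Prop := ∀ (formula : List String), Dom_parse_resource_stanzas_from_formula formula → Spec_parse_resource_stanzas_from_formula formula (parse_resource_stanzas_from_formula formula)

-- ===== LEMMAS AND PROOFS =====

theorem pvAppendLast_append : ∀ (xs : List String) (c l : String), pvAppendLast (xs ++ [c]) l = xs ++ [c ++ l] := by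
  intro xs
  induction xs with
  | nil => intro c l; simp [pvAppendLast]
  | cons x t ih =>
    intro c l
    cases t with
    | nil => simp [pvAppendLast]
    | cons y t' =>
      show x :: pvAppendLast ((y :: t') ++ [c]) l = x :: ((y :: t') ++ [c ++ l])
      rw [ih]

-- Joint invariant: from a 'not collecting' state the fold produces exactly B's stanzas;
-- from a 'collecting into cur' state it produces cur finished by pvInner, then B on the remainder.
theorem pvMain : ∀ (rest : List String),
    (∀ stanzas, (List.foldl pvStepA (stanzas, false) rest).1 = stanzas ++ parse_resource_stanzas_from_formula_alt rest) ∧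
    (∀ (cur : String) (stanzas : List String),
      (List.foldl pvStepA (stanzas ++ [cur], true) rest).1
        = stanzas ++ (pvInner cur rest).1 :: parse_resource_stanzas_from_formula_alt (pvInner cur rest).2) := by
  intro rest
  induction rest with
  | nil =>
    constructor
    · intro stanzas; simp [parse_resource_stanzas_from_formula_alt]
    · intro cur stanzas; simp [pvInner, parse_resource_stanzas_from_formula_alt]
  | cons l t ih =>
    have hR : "resource".toList = ['r','e','s','o','u','r','c','e'] := rfl
    have hE : "end".toList = ['e','n','d'] := rfl
    constructor
    · intro stanzas
      by_cases h1 : PySem.Chars.startswith (PySem.Chars.lstrip l.toList) ['r','e','s','o','u','r','c','e'] = true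
      · have e : pvStepA (stanzas, false) l = (stanzas ++ [l], true) := by
          simp [pvStepA, hR, h1]
        rw [List.foldl_cons, e, ih.2 l stanzas]
        simp [parse_resource_stanzas_from_formula_alt, hR, h1]
      · have e : pvStepA (stanzas, false) l = (stanzas, false) := by
          simp [pvStepA, hR, h1]
        rw [List.foldl_cons, e, ih.1 stanzas]
        simp [parse_resource_stanzas_from_formula_alt, hR, h1]
    · intro cur stanzas
      by_cases h1 : PySem.Chars.startswith (PySem.Chars.lstrip l.toList) ['r','e','s','o','u','r','c','e'] = true
      · have e : pvStepA (stanzas ++ [cur], true) l = ((stanzas ++ [cur]) ++ [l], true) := by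
          simp [pvStepA, hR, h1]
        rw [List.foldl_cons, e, ih.2 l (stanzas ++ [cur])]
        simp [pvInner, parse_resource_stanzas_from_formula_alt, hR, h1]
      · by_cases h2 : PySem.Chars.startswith (PySem.Chars.lstrip l.toList) ['e','n','d'] = true
        · have e : pvStepA (stanzas ++ [cur], true) l = (stanzas ++ [(cur ++ l) ++ "\n"], false) := by
            simp [pvStepA, hR, hE, h1, h2, pvAppendLast_append]
          rw [List.foldl_cons, e, ih.1]
          simp [pvInner, hR, hE, h1, h2]
        · have e : pvStepA (stanzas ++ [cur], true) l = (stanzas ++ [cur ++ l], true) := by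
            simp [pvStepA, hR, hE, h1, h2, pvAppendLast_append]
          rw [List.foldl_cons, e, ih.2 (cur ++ l) stanzas]
          simp [pvInner, hR, hE, h1, h2]

-- ===== VERDICT (by name: the statement is the Claim_ definition above) =====
theorem parse_resource_stanzas_from_formula_spec : Claim_equal_parse_resource_stanzas_from_formula := by
  intro formula _
  unfold Spec_parse_resource_stanzas_from_formula parse_resource_stanzas_from_formula
  have h := (pvMain formula).1 []
  simpa using h
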